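-- pv_equiv track=rewrite | github.com/praveenbhandari/SF-Vibe-Hackathon | utils/learning_mode.py | detect_learning_preference
-- ===== SOURCE A (Python) =====
-- from typing import List, Dict, Any
--
-- def detect_learning_preference(user_input: str) -> Dict[str, str]:
--     """
--     Hardcoded learning preference detection for demo purposes.
--     Analyzes user input for learning preference keywords.
--     """
--     user_lower = user_input.lower()
--
--     # Initialize preferences
--     prefs = {
--         "preferred_content_type": None,
--         "preferred_learning_style": None,
--         "project_preference": None,
--         "preferred_pace": None
--     }
--
--     # Detect content type preferences
--     if any(word in user_lower for word in ["video", "watch", "visual", "see", "youtube"]):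
--         prefs["preferred_content_type"] = "videos"
--     elif any(word in user_lower for word in ["article", "read", "text", "documentation", "written"]):
--         prefs["preferred_content_type"] = "articles"
--
--     # Detect learning style preferences
--     if any(word in user_lower for word in ["visual", "diagram", "chart", "see", "watch"]):
--         prefs["preferred_learning_style"] = "visual"
--     elif any(word in user_lower for word in ["hands-on", "practice", "coding", "build", "create"]):
--         prefs["preferred_learning_style"] = "kinesthetic"
--     elif any(word in user_lower for word in ["listen", "audio", "podcast", "hear"]):
--         prefs["preferred_learning_style"] = "auditory"
--
--     # Detect project preferences
--     if any(word in user_lower for word in ["small", "quick", "assignment", "exercise", "challenge"]):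
--         prefs["project_preference"] = "small_assignments"
--     elif any(word in user_lower for word in ["big", "large", "project", "comprehensive", "build"]):
--         prefs["project_preference"] = "big_projects"
--
--     # Detect pace preferences
--     if any(word in user_lower for word in ["quick", "fast", "brief", "summary"]):
--         prefs["preferred_pace"] = "fast"
--     elif any(word in user_lower for word in ["detailed", "comprehensive", "thorough", "step-by-step"]):
--         prefs["preferred_pace"] = "slow"
--
--     return prefs
-- ===== SOURCE B (Python) =====
-- from typing import Dict
--
-- # All distinct keywords, sorted; each is tested against the input ONCE.
-- _ALL_KEYWORDS = [
--     "article", "assignment", "audio", "big", "brief", "build", "challenge",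
--     "chart", "coding", "comprehensive", "create", "detailed", "diagram",
--     "documentation", "exercise", "fast", "hands-on", "hear", "large",
--     "listen", "podcast", "practice", "project", "quick", "read", "see",
--     "small", "step-by-step", "summary", "text", "thorough", "video",
--     "visual", "watch", "written", "youtube",
-- ]
--
-- # key -> ordered groups (rank, label, keyword set); lower rank wins.
-- _GROUPS = {
--     "preferred_content_type": [
--         (0, "videos", frozenset(["video", "watch", "visual", "see", "youtube"])),
--         (1, "articles", frozenset(["article", "read", "text", "documentation", "written"])),
--     ],
--     "preferred_learning_style": [
--         (0, "visual", frozenset(["visual", "diagram", "chart", "see", "watch"])),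
--         (1, "kinesthetic", frozenset(["hands-on", "practice", "coding", "build", "create"])),
--         (2, "auditory", frozenset(["listen", "audio", "podcast", "hear"])),
--     ],
--     "project_preference": [
--         (0, "small_assignments", frozenset(["small", "quick", "assignment", "exercise", "challenge"])),
--         (1, "big_projects", frozenset(["big", "large", "project", "comprehensive", "build"])),
--     ],
--     "preferred_pace": [
--         (0, "fast", frozenset(["quick", "fast", "brief", "summary"])),
--         (1, "slow", frozenset(["detailed", "comprehensive", "thorough", "step-by-step"])),
--     ],
-- }
--
-- def detect_learning_preference(user_input: str) -> Dict[str, str]: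
--     ul = user_input.lower()
--     # Stage 1: one substring test per distinct keyword (shared keywords tested once).
--     matched = {w for w in _ALL_KEYWORDS if w in ul}
--     # Stage 2: per key, select the minimal-rank group that intersects the matched set.
--     result = {}
--     for key, groups in _GROUPS.items():
--         hits = [(rank, label) for rank, label, kws in groups if kws & matched]
--         result[key] = min(hits, key=lambda h: h[0])[1] if hits else None
--     return result
-- ===== Notes on version B (the rewrite author's own statement) =====
-- stated objective: alternative
-- what changed: B inverts the traversal: it first computes, in one pass over a global deduplicated sorted keyword list, the set of keywords occurring in the lowered input (each shared keyword like 'visual'/'quick'/'build' is substring-tested once instead of once per group), then picks each output label by minimum-rank selection over the groups whose keyword set intersects that matched set, instead of A's four hand-written short-circuiting if/elif substring-scan chains.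
import Mathlib
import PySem

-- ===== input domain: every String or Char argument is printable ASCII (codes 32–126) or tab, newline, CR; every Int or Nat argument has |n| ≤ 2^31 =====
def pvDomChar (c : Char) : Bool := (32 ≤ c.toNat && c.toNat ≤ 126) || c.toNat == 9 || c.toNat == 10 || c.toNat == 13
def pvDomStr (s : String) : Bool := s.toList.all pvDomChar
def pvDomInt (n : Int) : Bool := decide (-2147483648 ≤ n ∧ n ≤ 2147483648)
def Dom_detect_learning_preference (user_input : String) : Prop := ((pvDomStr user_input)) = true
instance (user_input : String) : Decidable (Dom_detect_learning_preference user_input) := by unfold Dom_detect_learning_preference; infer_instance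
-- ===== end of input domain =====

-- B inverts the traversal: one pass computing the matched-keyword set over a global deduplicated
-- keyword list, then minimum-rank selection over intersecting groups (objective: alternative).

-- ===== PORT A =====
def detect_learning_preference (user_input : String) : List (String × Option String) :=
  let user_lower := PySem.Str.lower user_input
  let prefs : PySem.Dict String (Option String) := PySem.Dict.ofList
    [("preferred_content_type", none), ("preferred_learning_style", none),
     ("project_preference", none), ("preferred_pace", none)]
  let prefs :=
    if (["video", "watch", "visual", "see", "youtube"].any (fun w => PySem.Str.isIn w user_lower)) then
      prefs.insert "preferred_content_type" (some "videos")
    else if (["article", "read", "text", "documentation", "written"].any (fun w => PySem.Str.isIn w user_lower)) then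
      prefs.insert "preferred_content_type" (some "articles")
    else prefs
  let prefs :=
    if (["visual", "diagram", "chart", "see", "watch"].any (fun w => PySem.Str.isIn w user_lower)) then
      prefs.insert "preferred_learning_style" (some "visual")
    else if (["hands-on", "practice", "coding", "build", "create"].any (fun w => PySem.Str.isIn w user_lower)) then
      prefs.insert "preferred_learning_style" (some "kinesthetic")
    else if (["listen", "audio", "podcast", "hear"].any (fun w => PySem.Str.isIn w user_lower)) then
      prefs.insert "preferred_learning_style" (some "auditory")
    else prefs
  let prefs :=
    if (["small", "quick", "assignment", "exercise", "challenge"].any (fun w => PySem.Str.isIn w user_lower)) then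
      prefs.insert "project_preference" (some "small_assignments")
    else if (["big", "large", "project", "comprehensive", "build"].any (fun w => PySem.Str.isIn w user_lower)) then
      prefs.insert "project_preference" (some "big_projects")
    else prefs
  let prefs :=
    if (["quick", "fast", "brief", "summary"].any (fun w => PySem.Str.isIn w user_lower)) then
      prefs.insert "preferred_pace" (some "fast")
    else if (["detailed", "comprehensive", "thorough", "step-by-step"].any (fun w => PySem.Str.isIn w user_lower)) then
      prefs.insert "preferred_pace" (some "slow")
    else prefs
  prefs.items

-- ===== PORT B =====
-- _ALL_KEYWORDS: all distinct keywords, sorted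
def allKeywords : List String :=
  ["article", "assignment", "audio", "big", "brief", "build", "challenge",
   "chart", "coding", "comprehensive", "create", "detailed", "diagram",
   "documentation", "exercise", "fast", "hands-on", "hear", "large",
   "listen", "podcast", "practice", "project", "quick", "read", "see",
   "small", "step-by-step", "summary", "text", "thorough", "video",
   "visual", "watch", "written", "youtube"]

-- _GROUPS: key -> ordered (rank, label, frozenset of keywords); the dict is an assoc list,
-- each frozenset a PySem.Set (list of its distinct elements)
def groupTable : List (String × List (Nat × String × PySem.Set String)) :=
  [("preferred_content_type",
     [(0, "videos", ["video", "watch", "visual", "see", "youtube"]),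
      (1, "articles", ["article", "read", "text", "documentation", "written"])]),
   ("preferred_learning_style",
     [(0, "visual", ["visual", "diagram", "chart", "see", "watch"]),
      (1, "kinesthetic", ["hands-on", "practice", "coding", "build", "create"]),
      (2, "auditory", ["listen", "audio", "podcast", "hear"])]),
   ("project_preference",
     [(0, "small_assignments", ["small", "quick", "assignment", "exercise", "challenge"]),
      (1, "big_projects", ["big", "large", "project", "comprehensive", "build"])]),
   ("preferred_pace",
     [(0, "fast", ["quick", "fast", "brief", "summary"]),
      (1, "slow", ["detailed", "comprehensive", "thorough", "step-by-step"])])]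

def detect_learning_preference_alt (user_input : String) : List (String × Option String) :=
  let ul := PySem.Str.lower user_input
  -- matched = {w for w in _ALL_KEYWORDS if w in ul}
  let matched : PySem.Set String := PySem.Set.ofList (allKeywords.filter (fun w => PySem.Str.isIn w ul))
  -- for each key: hits = [(rank, label) for ... if kws & matched], then min by rank (or None)
  groupTable.map (fun kg =>
    (kg.1,
      let hits := (kg.2.filter (fun g => !(PySem.Set.inter g.2.2 matched).isEmpty)).map (fun g => (g.1, g.2.1))
      if hits.isEmpty then none else (PySem.List.min? hits (fun h => h.1)).map (fun m => m.2)))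

-- ===== PRECONDITION & SPEC =====
def Spec_detect_learning_preference (user_input : String) (out : List (String × Option String)) : Prop := out = detect_learning_preference_alt user_input
instance (user_input : String) (out : List (String × Option String)) : Decidable (Spec_detect_learning_preference user_input out) := by unfold Spec_detect_learning_preference; infer_instance

-- ===== CLAIM (what is proved, stated in full; the proofs are below) =====
def Claim_equal_detect_learning_preference : Prop := ∀ (user_input : String), Dom_detect_learning_preference user_input → Spec_detect_learning_preference user_input (detect_learning_preference user_input)

-- ===== LEMMAS AND PROOFS =====

-- a group's frozenset intersects the matched-keyword set iff one of its keywords is in the input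
lemma inter_matched_isEmpty (kws : List String) (p : String → Bool)
    (h : ∀ w ∈ kws, w ∈ allKeywords) :
    (PySem.Set.inter kws (PySem.Set.ofList (allKeywords.filter p))).isEmpty = !(kws.any p) := by
  cases ha : kws.any p with
  | true =>
    obtain ⟨w, hw, hp⟩ := List.any_eq_true.mp ha
    have hmem : w ∈ PySem.Set.inter kws (PySem.Set.ofList (allKeywords.filter p)) := by
      rw [PySem.Set.mem_inter]
      exact ⟨hw, (PySem.Set.mem_ofList _ _).mpr (List.mem_filter.mpr ⟨h w hw, hp⟩)⟩
    cases hn : PySem.Set.inter kws (PySem.Set.ofList (allKeywords.filter p)) with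
    | nil => rw [hn] at hmem; simp at hmem
    | cons x t => rfl
  | false =>
    have : PySem.Set.inter kws (PySem.Set.ofList (allKeywords.filter p)) = [] := by
      rw [List.eq_nil_iff_forall_not_mem]
      intro y hy
      rw [PySem.Set.mem_inter, PySem.Set.mem_ofList, List.mem_filter] at hy
      exact (List.any_eq_false.mp ha y hy.1) hy.2.2
    simp [this]

-- ===== VERDICT (by name: the statement is the Claim_ definition above) =====
theorem detect_learning_preference_spec : Claim_equal_detect_learning_preference := by
  intro u _
  unfold Spec_detect_learning_preference detect_learning_preference detect_learning_preference_alt groupTable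
  simp only [List.map_cons, List.map_nil, List.filter_cons, List.filter_nil]
  generalize (PySem.Str.lower u) = ul
  rw [inter_matched_isEmpty _ _ (by decide), inter_matched_isEmpty _ _ (by decide),
      inter_matched_isEmpty _ _ (by decide), inter_matched_isEmpty _ _ (by decide),
      inter_matched_isEmpty _ _ (by decide), inter_matched_isEmpty _ _ (by decide),
      inter_matched_isEmpty _ _ (by decide), inter_matched_isEmpty _ _ (by decide),
      inter_matched_isEmpty _ _ (by decide)]
  generalize (["video", "watch", "visual", "see", "youtube"].any (fun w => PySem.Str.isIn w ul)) = a1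
  generalize (["article", "read", "text", "documentation", "written"].any (fun w => PySem.Str.isIn w ul)) = a2
  generalize (["visual", "diagram", "chart", "see", "watch"].any (fun w => PySem.Str.isIn w ul)) = a3
  generalize (["hands-on", "practice", "coding", "build", "create"].any (fun w => PySem.Str.isIn w ul)) = a4
  generalize (["listen", "audio", "podcast", "hear"].any (fun w => PySem.Str.isIn w ul)) = a5
  generalize (["small", "quick", "assignment", "exercise", "challenge"].any (fun w => PySem.Str.isIn w ul)) = a6
  generalize (["big", "large", "project", "comprehensive", "build"].any (fun w => PySem.Str.isIn w ul)) = a7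
  generalize (["quick", "fast", "brief", "summary"].any (fun w => PySem.Str.isIn w ul)) = a8
  generalize (["detailed", "comprehensive", "thorough", "step-by-step"].any (fun w => PySem.Str.isIn w ul)) = a9
  revert a1 a2 a3 a4 a5 a6 a7 a8 a9
  decide
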